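-- pv_equiv track=rewrite | github.com/BabaChiku/DSA_Journey | Scaler/Module 2 - Introduction to problem solving/Class 3 - Introduction to Arrays/AP3-CountOfElements.py | solve
-- ===== SOURCE A (Python) =====
-- def solve(A):
--     # Find the length of the array A
--     n = len(A)
--     # If the length of the array A is less than or equal to 1, return 0
--     if n <= 1:
--         return 0
--     # Initialize the count variable to 0
--     count = 0
--     # Initialize the max_value variable to -1
--     max_value = -1
--     max_element = 0
--     # Loop through the array A to find the maximum value using two pointers
--     i = 0
--     j = n - 1
--     while i < j:
--         # Check if A[i] is greater than A[j]
--         if A[i] > A[j]: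
--             # If A[i] is greater, check if it is greater than max_value
--             if A[i] > max_value:
--                 # If A[i] is greater than max_value, increment the count variable by max_element(number of maximum elements found so far, as all of now have at least one greater than itself) + 1(A[j] has A[i] greater than itself)
--                 count += max_element + 1
--                 # Set max_element to 1 as we have found a new maximum element
--                 max_element = 1
--                 # Update the max_value to A[i]
--                 max_value = A[i]
--             elif A[i] < max_value:
--                 # If A[i] is not greater than max_value, increment the count variable by 2, as both A[i] and A[j] have at least one greater than itself
--                 count += 2
--             else:
--                 # If A[i] is equal to max_value, increment the count variable by 1, as A[j] has at least one greater than itself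
--                 count += 1
--                 # Increment the max_element variable by 1, as we have found another maximum element
--                 max_element += 1
--         elif A[j] > A[i]:
--             # If A[j] is greater, check if it is greater than max_value
--             if A[j] > max_value:
--                 # If A[j] is greater than max_value, increment the count variable by max_element + 1
--                 count += max_element + 1
--                 # Set max_element to 1 as we have found a new maximum element
--                 max_element = 1
--                 # Update the max_value to A[j]
--                 max_value = A[j]
--             elif A[j] < max_value:
--                 # If A[j] is not greater than max_value, increment the count variable by 2
--                 count += 2
--             else:
--                 # If A[j] is equal to max_value, increment the count variable by 1
--                 count += 1
--                 # Increment the max_element variable by 1, as we have found another maximum element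
--                 max_element += 1
--         else:
--             # If A[i] is equal to A[j], check if A[i] is greater than max_value
--             if A[i] > max_value:
--                 # If A[i] is greater than max_value, increment the count variable by max_element only, as both A[i] and A[j] are equal and are greater than max_value
--                 count += max_element
--                 # Set max_element to 2 as we have found two new maximum elements
--                 max_element = 2
--                 # Update the max_value to A[i]
--                 max_value = A[i]
--             elif A[i] < max_value:
--                 # If A[i] is not greater than max_value, increment the count variable by 2, as both A[i] and A[j] have at least one greater than itself
--                 count += 2
--             else:
--                 # If A[i] is equal to max_value
--                 # Increment the max_element variable by 2, as we have found two maximum elements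
--                 max_element += 2
--
--         # Move the pointers towards each other
--         i += 1
--         j -= 1
--
--     # If i is equal to j, check if A[i] is greater than max_value
--     if i == j:
--         # If A[i] is greater than max_value, increment the count variable
--         if A[i] > max_value:
--             # Increment the count variable by max_element only, as A[i] is the same element as A[j]
--             count += max_element
--             # Set max_element to 1 as we have found a new maximum element
--             max_element = 1
--             # Update the max_value to A[i]
--             max_value = A[i]
--         elif A[i] < max_value:
--             # If A[i] is not greater than max_value, increment the count variable by 1, as A[i] has at least one greater than itself
--             count += 1
--
--     # Return the count variable
--     return count
-- ===== SOURCE B (Python) =====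
-- def solve(A):
--     return sum(1 for x in A if any(y > x for y in A))
-- ===== Notes on version B (the rewrite author's own statement) =====
-- stated objective: simpler
-- what changed: Replaces A's 80-line two-pointer scan that tracks a running maximum and a count of maxima with a one-line brute-force existence check: count each element for which some element of the list is strictly greater.
-- intended difference: On lists of length >= 2 whose elements are all < -1, A's max-tracker (initialised to -1) never updates, so A returns len(A), wrongly counting even the maximum elements; B returns the number of elements that have a strictly greater element, which is the intended count. — e.g. on solve([-3, -2]): A returns 2, B returns 1
import Mathlib
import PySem

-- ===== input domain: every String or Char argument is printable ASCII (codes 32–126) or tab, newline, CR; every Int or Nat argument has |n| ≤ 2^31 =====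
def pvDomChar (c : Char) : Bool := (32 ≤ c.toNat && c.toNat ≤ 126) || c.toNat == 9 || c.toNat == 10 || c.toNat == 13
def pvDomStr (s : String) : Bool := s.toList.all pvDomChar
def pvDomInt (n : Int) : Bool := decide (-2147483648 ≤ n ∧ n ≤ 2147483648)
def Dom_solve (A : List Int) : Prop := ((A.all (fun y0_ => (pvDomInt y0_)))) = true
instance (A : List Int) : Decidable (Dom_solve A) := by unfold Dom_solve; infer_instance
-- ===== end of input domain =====

-- B replaces A's two-pointer max-tracking scan with a one-line brute-force existence count
-- (count elements that have a strictly greater element); on lists whose elements are all < -1,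
-- A's tracker (initialised to -1) never updates and A returns len(A); B returns the intended count.


-- ===== PORT A =====
-- A's while-loop: state (i, j, count, max_value, max_element); indices are always in range
-- (0 ≤ i < j ≤ n-1), so the Python A[i]/A[j] is ported exactly as getD _ 0
def solveLoop (A : List Int) (i j : Nat) (count maxv maxel : Int) :
    Nat × Nat × Int × Int × Int :=
  if i < j then
    if A.getD i 0 > A.getD j 0 then
      if A.getD i 0 > maxv then solveLoop A (i+1) (j-1) (count + maxel + 1) (A.getD i 0) 1
      else if A.getD i 0 < maxv then solveLoop A (i+1) (j-1) (count + 2) maxv maxel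
      else solveLoop A (i+1) (j-1) (count + 1) maxv (maxel + 1)
    else if A.getD j 0 > A.getD i 0 then
      if A.getD j 0 > maxv then solveLoop A (i+1) (j-1) (count + maxel + 1) (A.getD j 0) 1
      else if A.getD j 0 < maxv then solveLoop A (i+1) (j-1) (count + 2) maxv maxel
      else solveLoop A (i+1) (j-1) (count + 1) maxv (maxel + 1)
    else
      if A.getD i 0 > maxv then solveLoop A (i+1) (j-1) (count + maxel) (A.getD i 0) 2
      else if A.getD i 0 < maxv then solveLoop A (i+1) (j-1) (count + 2) maxv maxel
      else solveLoop A (i+1) (j-1) count maxv (maxel + 2)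
  else (i, j, count, maxv, maxel)
termination_by j - i

def solve (A : List Int) : Int :=
  if A.length ≤ 1 then 0
  else
    match solveLoop A 0 (A.length - 1) 0 (-1) 0 with
    | (i, j, count, maxv, maxel) =>
      if i = j then
        if A.getD i 0 > maxv then count + maxel
        else if A.getD i 0 < maxv then count + 1
        else count
      else count

-- ===== PORT B =====
def solve_alt (A : List Int) : Int :=
  A.foldl (fun acc x => if A.any (fun y => y > x) then acc + 1 else acc) 0

-- ===== PRECONDITION & SPEC =====
-- On lists of length ≥ 2 whose elements are all < -1, A's max-tracker (initialised to -1)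
-- never updates, so A returns the full length, wrongly counting even the maximum elements;
-- B returns the number of elements having a strictly greater element, the intended count.
def D_solve (A : List Int) : Prop := 2 ≤ A.length ∧ ∀ x ∈ A, x < -1
instance (A : List Int) : Decidable (D_solve A) := by unfold D_solve; infer_instance
def Spec_solve (A : List Int) (out : Int) : Prop := ¬ D_solve A → out = solve_alt A
instance (A : List Int) (out : Int) : Decidable (Spec_solve A out) := by unfold Spec_solve; infer_instance
def pvDiffWitness_solve : List Int := [-3, -2]
def pvDiffWitnessOut_solve : Int × Int := (2, 1)

-- ===== CLAIM (what is proved, stated in full; the proofs are below) =====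
def Claim_unchanged_solve : Prop := ∀ (A : List Int), Dom_solve A → Spec_solve A (solve A)
def Claim_changed_solve : Prop := Dom_solve (pvDiffWitness_solve) ∧ D_solve (pvDiffWitness_solve) ∧ solve (pvDiffWitness_solve) = pvDiffWitnessOut_solve.1 ∧ solve_alt (pvDiffWitness_solve) = pvDiffWitnessOut_solve.2 ∧ pvDiffWitnessOut_solve.1 ≠ pvDiffWitnessOut_solve.2
def Claim_exact_solve : Prop := ∀ (A : List Int), Dom_solve A → D_solve A → solve A ≠ solve_alt A

-- ===== LEMMAS AND PROOFS =====

-- A's running maximum (seeded with -1) and the two counts its state tracks, as integers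
def mx (l : List Int) : Int := l.foldl max (-1)
def cLt (v : Int) (l : List Int) : Int := (l.countP fun x => decide (x < v) : Nat)
def cEq (v : Int) (l : List Int) : Int := (l.countP fun x => decide (x = v) : Nat)
-- the multiset of elements already processed when the loop state is (i, j, …)
def Qf (A : List Int) (i j : Nat) : List Int := A.take i ++ A.drop (j+1)
-- the code after A's loop, as a function of the loop's final state
def finishA (A : List Int) (st : Nat × Nat × Int × Int × Int) : Int :=
  match st with
  | (i, j, count, maxv, maxel) =>
    if i = j then
      if A.getD i 0 > maxv then count + maxel
      else if A.getD i 0 < maxv then count + 1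
      else count
    else count
-- one iteration of A's loop body as a state transformer
def step2 (c v me a b : Int) : Int × Int × Int :=
  if a > b then
    if a > v then (c + me + 1, a, 1)
    else if a < v then (c + 2, v, me)
    else (c + 1, v, me + 1)
  else if b > a then
    if b > v then (c + me + 1, b, 1)
    else if b < v then (c + 2, v, me)
    else (c + 1, v, me + 1)
  else
    if a > v then (c + me, a, 2)
    else if a < v then (c + 2, v, me)
    else (c, v, me + 2)

theorem take_getD (l : List Int) (i : Nat) (h : i < l.length) :
    l.take (i+1) = l.take i ++ [l.getD i 0] := by
  rw [List.getD_eq_getElem _ _ h, List.take_add_one, List.getElem?_eq_getElem h]; rfl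

theorem drop_getD (l : List Int) (j : Nat) (h : j < l.length) :
    l.drop j = l.getD j 0 :: l.drop (j+1) := by
  rw [List.getD_eq_getElem _ _ h, List.getElem_cons_drop]

theorem init_le_foldl_max (l : List Int) : ∀ b : Int, b ≤ l.foldl max b := by
  induction l with
  | nil => intro b; exact le_refl b
  | cons x t ih => intro b; exact le_trans (le_max_left b x) (ih (max b x))

theorem mem_le_foldl_max (l : List Int) : ∀ (b x : Int), x ∈ l → x ≤ l.foldl max b := by
  induction l with
  | nil => intro b x hx; cases hx
  | cons y t ih =>
    intro b x hx
    rcases List.mem_cons.mp hx with h | h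
    · subst h; exact le_trans (le_max_right b x) (init_le_foldl_max t _)
    · exact ih _ x h

theorem le_mx (l : List Int) (x : Int) (hx : x ∈ l) : x ≤ mx l := mem_le_foldl_max l (-1) x hx

theorem foldl_max_mem (l : List Int) : ∀ b : Int, l.foldl max b = b ∨ l.foldl max b ∈ l := by
  induction l with
  | nil => intro b; left; rfl
  | cons x t ih =>
    intro b
    rcases ih (max b x) with h | h
    · rcases max_choice b x with hm | hm
      · left; show t.foldl max (max b x) = b; rw [h, hm]
      · right; show t.foldl max (max b x) ∈ x :: t; rw [h, hm]; exact List.mem_cons_self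
    · right; exact List.mem_cons_of_mem _ h

theorem mx_mem_or (l : List Int) : mx l = -1 ∨ mx l ∈ l := foldl_max_mem l (-1)

theorem foldl_max_le (l : List Int) : ∀ b c : Int, b ≤ c → (∀ x ∈ l, x ≤ c) → l.foldl max b ≤ c := by
  induction l with
  | nil => intro b c hb _; exact hb
  | cons x t ih =>
    intro b c hb h
    exact ih (max b x) c (max_le hb (h x List.mem_cons_self)) (fun y hy => h y (List.mem_cons_of_mem _ hy))

theorem foldl_max_swap (l : List Int) : ∀ b a : Int, l.foldl max (max b a) = max a (l.foldl max b) := by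
  induction l with
  | nil => intro b a; exact max_comm b a
  | cons x t ih =>
    intro b a
    show t.foldl max (max (max b a) x) = max a (t.foldl max (max b x))
    rw [show max (max b a) x = max (max b x) a by omega]
    exact ih (max b x) a

theorem mx_mid (l1 l2 : List Int) (a : Int) : mx (l1 ++ a :: l2) = max a (mx (l1 ++ l2)) := by
  unfold mx
  rw [List.foldl_append, List.foldl_append]
  show l2.foldl max (max (l1.foldl max (-1)) a) = _
  exact foldl_max_swap l2 _ a

theorem cLt_mid (l1 l2 : List Int) (a w : Int) :
    cLt w (l1 ++ a :: l2) = cLt w (l1 ++ l2) + (if a < w then 1 else 0) := by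
  unfold cLt
  simp only [List.countP_append, List.countP_cons]
  by_cases h : a < w <;> simp [h] <;> push_cast <;> ring

theorem cEq_mid (l1 l2 : List Int) (a w : Int) :
    cEq w (l1 ++ a :: l2) = cEq w (l1 ++ l2) + (if a = w then 1 else 0) := by
  unfold cEq
  simp only [List.countP_append, List.countP_cons]
  by_cases h : a = w <;> simp [h] <;> push_cast <;> ring

theorem cnt_split (l : List Int) : cLt (mx l) l + cEq (mx l) l = (l.length : Int) := by
  unfold cLt cEq
  have h := List.length_eq_countP_add_countP (fun x => decide (x < mx l)) (l := l)
  have h2 : l.countP (fun a => decide ¬(decide (a < mx l) = true)) = l.countP (fun x => decide (x = mx l)) := by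
    apply List.countP_congr
    intro x hx
    have := le_mx l x hx
    simp only [decide_eq_true_eq]
    constructor
    · intro hcl; omega
    · intro hcl; omega
  rw [h2] at h
  omega

theorem cLt_gt (l : List Int) (w : Int) (h : mx l < w) : cLt w l = (l.length : Int) := by
  unfold cLt
  rw [List.countP_eq_length.mpr]
  intro x hx
  have := le_mx l x hx
  simp only [decide_eq_true_eq]
  omega

theorem cEq_gt (l : List Int) (w : Int) (h : mx l < w) : cEq w l = 0 := by
  unfold cEq
  rw [List.countP_eq_zero.mpr]
  · rfl
  · intro x hx
    have := le_mx l x hx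
    simp only [decide_eq_true_eq]
    omega

theorem solveLoop_step (A : List Int) (i j : Nat) (c v me : Int) (h : i < j) :
    solveLoop A i j c v me =
      (match step2 c v me (A.getD i 0) (A.getD j 0) with
       | (c', v', me') => solveLoop A (i+1) (j-1) c' v' me') := by
  rw [solveLoop.eq_def]
  simp only [if_pos h, step2]
  split_ifs <;> rfl

theorem pair_step (l1 l2 : List Int) (a b : Int) :
    step2 (cLt (mx (l1 ++ l2)) (l1 ++ l2)) (mx (l1 ++ l2)) (cEq (mx (l1 ++ l2)) (l1 ++ l2)) a b
      = (cLt (mx ((l1 ++ [a]) ++ b :: l2)) ((l1 ++ [a]) ++ b :: l2),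
         mx ((l1 ++ [a]) ++ b :: l2),
         cEq (mx ((l1 ++ [a]) ++ b :: l2)) ((l1 ++ [a]) ++ b :: l2)) := by
  have hassoc : (l1 ++ [a]) ++ l2 = l1 ++ a :: l2 := by simp
  have hmw : mx ((l1 ++ [a]) ++ b :: l2) = max b (max a (mx (l1 ++ l2))) := by
    rw [mx_mid (l1 ++ [a]) l2 b, hassoc, mx_mid l1 l2 a]
  have hclt : ∀ w, cLt w ((l1 ++ [a]) ++ b :: l2)
      = cLt w (l1 ++ l2) + (if a < w then 1 else 0) + (if b < w then 1 else 0) := by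
    intro w
    rw [cLt_mid (l1 ++ [a]) l2 b w, hassoc, cLt_mid l1 l2 a w]
  have hceq : ∀ w, cEq w ((l1 ++ [a]) ++ b :: l2)
      = cEq w (l1 ++ l2) + (if a = w then 1 else 0) + (if b = w then 1 else 0) := by
    intro w
    rw [cEq_mid (l1 ++ [a]) l2 b w, hassoc, cEq_mid l1 l2 a w]
  have hsplit := cnt_split (l1 ++ l2)
  unfold step2
  split_ifs with h1 h2 h3 h4 h5 h6 h7 h8 <;>
    simp only [Prod.mk.injEq] <;> refine ⟨?_, ?_, ?_⟩ <;>
    (try rw [hclt]) <;> (try rw [hceq]) <;> (try rw [hmw]) <;>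
    (rcases eq_or_lt_of_le (show mx (l1 ++ l2) ≤ max b (max a (mx (l1 ++ l2))) from by omega) with hcase | hcase
     · rw [← hcase]
       all_goals (first | (split_ifs <;> omega) | omega)
     · have e1 := cLt_gt (l1 ++ l2) _ hcase
       have e2 := cEq_gt (l1 ++ l2) _ hcase
       all_goals (first | (split_ifs <;> omega) | omega))

theorem loop_inv (A : List Int) :
    ∀ (k i j : Nat), j + 1 - i ≤ k → i ≤ j + 1 → j + 1 ≤ A.length →
      finishA A (solveLoop A i j (cLt (mx (Qf A i j)) (Qf A i j)) (mx (Qf A i j)) (cEq (mx (Qf A i j)) (Qf A i j))) = cLt (mx A) A := by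
  intro k
  induction k with
  | zero =>
    intro i j hk hi hlen
    have hij : i = j + 1 := by omega
    subst hij
    have hQ : Qf A (j+1) j = A := List.take_append_drop _ _
    rw [hQ, solveLoop.eq_def]
    rw [if_neg (by omega : ¬ (j + 1 < j))]
    simp only [finishA]
    rw [if_neg (by omega : ¬ (j + 1 = j))]
  | succ k ih =>
    intro i j hk hi hlen
    by_cases h1 : i = j + 1
    · subst h1
      have hQ : Qf A (j+1) j = A := List.take_append_drop _ _
      rw [hQ, solveLoop.eq_def]
      rw [if_neg (by omega : ¬ (j + 1 < j))]
      simp only [finishA]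
      rw [if_neg (by omega : ¬ (j + 1 = j))]
    · by_cases h2 : i = j
      · subst h2
        rw [solveLoop.eq_def, if_neg (by omega : ¬ (i < i))]
        simp only [finishA, if_true]
        have hiL : i < A.length := by omega
        have hA : A = A.take i ++ A.getD i 0 :: A.drop (i+1) := by
          conv_lhs => rw [← List.take_append_drop i A, drop_getD A i hiL]
        have hmxA : mx A = max (A.getD i 0) (mx (Qf A i i)) := by
          conv_lhs => rw [hA]
          exact mx_mid _ _ _
        have hcA : ∀ w, cLt w A = cLt w (Qf A i i) + (if A.getD i 0 < w then 1 else 0) := by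
          intro w
          conv_lhs => rw [hA]
          exact cLt_mid _ _ _ _
        have hsplit := cnt_split (Qf A i i)
        rw [hmxA, hcA]
        rcases eq_or_lt_of_le (show mx (Qf A i i) ≤ max (A.getD i 0) (mx (Qf A i i)) from by omega) with hcase | hcase
        · rw [← hcase]
          split_ifs <;> omega
        · have e1 := cLt_gt (Qf A i i) _ hcase
          split_ifs <;> omega
      · have hij : i < j := by omega
        have hiL : i < A.length := by omega
        have hjL : j < A.length := by omega
        rw [solveLoop_step A i j _ _ _ hij]
        have hQ' : (A.take i ++ [A.getD i 0]) ++ A.getD j 0 :: A.drop (j+1) = Qf A (i+1) (j-1) := by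
          unfold Qf
          rw [show j - 1 + 1 = j from by omega, take_getD A i hiL, drop_getD A j hjL]
        have hstep := pair_step (A.take i) (A.drop (j+1)) (A.getD i 0) (A.getD j 0)
        rw [hQ'] at hstep
        have hQij : Qf A i j = A.take i ++ A.drop (j+1) := rfl
        rw [hQij, hstep]
        exact ih (i+1) (j-1) (by omega) (by omega) (by omega)

theorem solve_cnt (A : List Int) (h : 2 ≤ A.length) : solve A = cLt (mx A) A := by
  have h0 : Qf A 0 (A.length - 1) = [] := by
    unfold Qf
    rw [show A.length - 1 + 1 = A.length from by omega]
    simp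
  have hinv := loop_inv A A.length 0 (A.length - 1) (by omega) (by omega) (by omega)
  rw [h0] at hinv
  rw [show cLt (mx []) [] = (0:Int) from rfl, show cEq (mx []) [] = (0:Int) from rfl,
      show mx [] = (-1:Int) from rfl] at hinv
  unfold solve
  rw [if_neg (by omega)]
  exact hinv

theorem alt_foldl (A : List Int) : ∀ (l : List Int) (acc : Int),
    l.foldl (fun acc x => if A.any (fun y => y > x) then acc + 1 else acc) acc
      = acc + (l.countP (fun x => A.any (fun y => y > x)) : Nat) := by
  intro l
  induction l with
  | nil => intro acc; simp
  | cons x t ih =>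
    intro acc
    by_cases hx : A.any (fun y => y > x)
    · simp only [List.foldl_cons, hx, if_pos, List.countP_cons, ih]
      push_cast
      simp [hx]
      ring
    · simp only [List.foldl_cons, hx, if_neg, List.countP_cons, ih]
      push_cast
      simp [hx]

theorem solve_alt_cnt (A : List Int) :
    solve_alt A = (A.countP (fun x => A.any (fun y => y > x)) : Nat) := by
  unfold solve_alt
  rw [alt_foldl]
  ring

theorem exists_max (l : List Int) (h : l ≠ []) : ∃ m ∈ l, ∀ x ∈ l, x ≤ m := by
  induction l with
  | nil => exact absurd rfl h
  | cons x t ih =>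
    rcases t with _ | ⟨y, t'⟩
    · exact ⟨x, List.mem_cons_self, by intro z hz; rcases List.mem_cons.mp hz with h | h; omega; cases h⟩
    · obtain ⟨m, hm, hmax⟩ := ih (by simp)
      by_cases hxm : x ≤ m
      · exact ⟨m, List.mem_cons_of_mem _ hm, by
          intro z hz
          rcases List.mem_cons.mp hz with h | h
          · omega
          · exact hmax z h⟩
      · exact ⟨x, List.mem_cons_self, by
          intro z hz
          rcases List.mem_cons.mp hz with h | h
          · omega
          · have := hmax z h; omega⟩

-- ===== VERDICT (by name: the statement is the Claim_ definition above) =====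
theorem solve_spec : Claim_unchanged_solve := by
  intro A _ hnD
  by_cases hlen : A.length ≤ 1
  · rcases A with _ | ⟨x, _ | ⟨y, t⟩⟩
    · rfl
    · simp [solve, solve_alt]
    · simp at hlen
  · have h2 : 2 ≤ A.length := by omega
    rw [solve_cnt A h2, solve_alt_cnt]
    have hex : ∃ x ∈ A, (-1:Int) ≤ x := by
      unfold D_solve at hnD
      push_neg at hnD
      obtain ⟨x, hx, hxe⟩ := hnD h2
      exact ⟨x, hx, hxe⟩
    unfold cLt
    apply congrArg (Nat.cast)
    apply List.countP_congr
    intro x hx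
    simp only [List.any_eq_true, decide_eq_true_eq, gt_iff_lt]
    constructor
    · intro hlt
      rcases mx_mem_or A with hm | hm
      · obtain ⟨x0, hx0, hx0ge⟩ := hex
        exact ⟨x0, hx0, by rw [hm] at hlt; omega⟩
      · exact ⟨mx A, hm, hlt⟩
    · rintro ⟨y, hy, hxy⟩
      have := le_mx A y hy
      omega

theorem solve_changed : Claim_changed_solve := by
  refine ⟨by decide, by decide, ?_, by decide, by decide⟩
  show solve [-3, -2] = 2
  simp [solve, solveLoop]

theorem solve_tight : Claim_exact_solve := by
  intro A _ hD
  obtain ⟨h2, hall⟩ := hD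
  have hmxA : mx A = -1 := by
    have h1 : mx A ≤ -1 := foldl_max_le A (-1) (-1) (le_refl _) (fun x hx => by have := hall x hx; omega)
    have h3 : (-1:Int) ≤ mx A := init_le_foldl_max A (-1)
    omega
  rw [solve_cnt A h2, solve_alt_cnt, hmxA]
  have hlen : cLt (-1) A = (A.length : Int) := by
    unfold cLt
    rw [List.countP_eq_length.mpr]
    intro x hx
    simp only [decide_eq_true_eq]
    exact hall x hx
  rw [hlen]
  intro hEq
  have hc : A.countP (fun x => A.any (fun y => y > x)) = A.length := by exact_mod_cast hEq.symm
  have hallp := List.countP_eq_length.mp hc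
  have hne : A ≠ [] := by intro h; rw [h] at h2; simp at h2
  obtain ⟨m, hm, hmax⟩ := exists_max A hne
  have hp := hallp m hm
  simp only [List.any_eq_true, decide_eq_true_eq, gt_iff_lt] at hp
  obtain ⟨y, hy, hmy⟩ := hp
  have := hmax y hy
  omega
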